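-- pv_equiv track=rewrite | github.com/Autumnhui/WordCloud-DouBan_Topic | venv/lib/python3.7/site-packages/plot/tk/arrayTK/all_indexes.py | all_indexes
-- ===== SOURCE A (Python) =====
-- def all_indexes(shape):
--     # (Tuple) -> List[Tuple]
--     """Return all the indexes for an array
--
--     Args:
--         shape (tuple): a tuple representing array shape
--
--     Returns:
--         a list of all possible indexes (tuples)
--     """
--     def tail(xs): return xs[1:]
--
--     def aux(shape, accum):
--         # type: (Tuple, List) -> List
--         if len(shape) == 0:
--             return accum
--         else:
--             return aux(
--                 tail(shape),
--                 [xs + [j] for xs in accum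
--                  for j in range(shape[0])])
--     return [tuple(x) for x in aux(shape, [[]])]
-- ===== SOURCE B (Python) =====
-- def all_indexes(shape):
--     # (Tuple) -> List[Tuple]
--     """Return all the indexes for an array (list of tuples, last dim fastest)."""
--     def rec(dims):
--         if len(dims) == 0:
--             return [()]
--         if dims[0] <= 0:
--             return []
--         rest = rec(dims[1:])
--         return [(j,) + ys for j in range(dims[0]) for ys in rest]
--     return rec(list(shape))
-- ===== Notes on version B (the rewrite author's own statement) =====
-- stated objective: alternative
-- what changed: Replaces the tail-recursive accumulator that extends every partial index on the right with a direct structural recursion that builds each full index front-to-back by prepending the head-dimension index to the recursively computed tails (no accumulator, no final tuple-conversion pass).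
import Mathlib
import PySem

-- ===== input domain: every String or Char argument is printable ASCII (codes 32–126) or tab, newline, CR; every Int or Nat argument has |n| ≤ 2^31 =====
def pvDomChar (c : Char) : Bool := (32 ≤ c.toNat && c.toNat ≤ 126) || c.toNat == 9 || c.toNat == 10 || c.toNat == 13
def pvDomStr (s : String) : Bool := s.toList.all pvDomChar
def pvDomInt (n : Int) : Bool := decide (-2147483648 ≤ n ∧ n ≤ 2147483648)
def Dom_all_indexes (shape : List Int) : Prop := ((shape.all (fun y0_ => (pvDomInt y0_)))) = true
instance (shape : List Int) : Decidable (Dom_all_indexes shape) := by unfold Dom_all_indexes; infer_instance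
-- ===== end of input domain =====

-- B replaces A's accumulator-passing tail recursion with a direct front-to-back structural recursion (alternative decomposition, same cost).

-- ===== PORT A =====
-- aux(shape, accum): extends every partial index in accum by each j in range(shape[0])
def all_indexes_aux : List Int → List (List Int) → List (List Int)
  | [], accum => accum
  | s :: t, accum =>
      all_indexes_aux t (accum.flatMap (fun xs => (PySem.List.pyRange 0 s 1).map (fun j => xs ++ [j])))

def all_indexes (shape : List Int) : List (List Int) :=
  (all_indexes_aux shape [[]]).map (fun x => x)   -- [tuple(x) for x in ...]

-- ===== PORT B =====
def all_indexes_alt : List Int → List (List Int)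
  | [] => [[]]
  | s :: t =>
      if s ≤ 0 then []
      else
        let rest := all_indexes_alt t
        (PySem.List.pyRange 0 s 1).flatMap (fun j => rest.map (fun ys => j :: ys))

-- ===== PRECONDITION & SPEC =====
def Spec_all_indexes (shape : List Int) (out : List (List Int)) : Prop := out = all_indexes_alt shape
instance (shape : List Int) (out : List (List Int)) : Decidable (Spec_all_indexes shape out) := by unfold Spec_all_indexes; infer_instance

-- ===== CLAIM (what is proved, stated in full; the proofs are below) =====
def Claim_equal_all_indexes : Prop := ∀ (shape : List Int), Dom_all_indexes shape → Spec_all_indexes shape (all_indexes shape)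

-- ===== LEMMAS AND PROOFS =====
-- Invariant of A's accumulator loop: it appends every element of (all_indexes_alt shape) to every accumulated prefix.
theorem all_indexes_aux_eq (shape : List Int) (accum : List (List Int)) :
    all_indexes_aux shape accum = accum.flatMap (fun xs => (all_indexes_alt shape).map (fun ys => xs ++ ys)) := by
  induction shape generalizing accum with
  | nil => simp [all_indexes_aux, all_indexes_alt]
  | cons s t ih =>
      by_cases hs : s ≤ 0
      · have h0 : accum.flatMap (fun _ : List Int => ([] : List (List Int))) = [] := by
          induction accum <;> simp_all
        simp [all_indexes_aux, all_indexes_alt, hs, ih,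
              PySem.List.pyRange_one_eq_nil hs, h0]
      · simp only [all_indexes_aux, all_indexes_alt, if_neg hs, ih]
        simp [List.flatMap_assoc, List.map_flatMap, List.flatMap_map, Function.comp_def]

-- ===== VERDICT (by name: the statement is the Claim_ definition above) =====
theorem all_indexes_spec : Claim_equal_all_indexes := by
  intro shape _
  unfold Spec_all_indexes all_indexes
  rw [all_indexes_aux_eq]
  simp
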